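-- pv_equiv track=rewrite | github.com/logang-di/dsx-connect | shared/file_ops.py | _expand_exclude_directive
-- ===== SOURCE A (Python) =====
-- from typing import AsyncGenerator, Iterable, Iterator, List, Optional, Set, Tuple
--
-- def _expand_exclude_directive(tokens: List[str]) -> List[str]:
--     out, i = [], 0
--     while i < len(tokens):
--         t = tokens[i]
--         if t in ("--exclude", "--include"):
--             if i + 1 < len(tokens):
--                 out.append(("-" if t == "--exclude" else "") + tokens[i+1])
--                 i += 2
--             else:
--                 i += 1
--         elif t.startswith("--exclude=") or t.startswith("--include="):
--             k, v = t.split("=", 1)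
--             out.append(("-" if k == "--exclude" else "") + v)
--             i += 1
--         else:
--             out.append(t)
--             i += 1
--     return out
-- ===== SOURCE B (Python) =====
-- def _expand_exclude_directive(tokens):
--     out = []
--     pending = None  # prefix ("-" or "") waiting for its value token
--     for t in tokens:
--         if pending is not None:
--             out.append(pending + t)
--             pending = None
--         elif t == "--exclude":
--             pending = "-"
--         elif t == "--include":
--             pending = ""
--         elif t.startswith("--exclude="):
--             out.append("-" + t.split("=", 1)[1])
--         elif t.startswith("--include="):
--             out.append(t.split("=", 1)[1])
--         else:
--             out.append(t)
--     return out
-- ===== Notes on version B (the rewrite author's own statement) =====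
-- stated objective: simpler
-- what changed: Replaced the index-based while-loop with i+1 lookahead by a single for-loop state machine that carries a 'pending' prefix across iterations, eliminating index arithmetic entirely.
import Mathlib
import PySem

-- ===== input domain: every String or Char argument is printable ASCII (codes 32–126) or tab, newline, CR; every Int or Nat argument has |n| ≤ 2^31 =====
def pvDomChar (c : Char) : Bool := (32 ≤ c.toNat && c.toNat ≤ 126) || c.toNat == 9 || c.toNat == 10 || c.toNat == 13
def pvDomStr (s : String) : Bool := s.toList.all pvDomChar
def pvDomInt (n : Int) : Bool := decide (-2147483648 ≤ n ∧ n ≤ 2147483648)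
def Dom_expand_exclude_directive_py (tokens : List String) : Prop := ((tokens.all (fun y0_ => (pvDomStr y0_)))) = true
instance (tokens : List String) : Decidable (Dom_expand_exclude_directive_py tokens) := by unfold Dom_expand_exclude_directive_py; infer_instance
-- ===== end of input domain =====

-- B replaces A's index-with-lookahead while-loop by a single state-machine pass
-- (a 'pending' prefix carried across iterations); objective: simpler, same cost.

-- ===== PORT A =====
-- A's while-loop over index i, with the i+1 lookahead, transcribed as recursion
-- consuming one or two tokens per step (the inner match on `rest` is the
-- 'if i + 1 < len(tokens)' lookahead).
def expand_exclude_directive_py (tokens : List String) : List String :=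
  match tokens with
  | [] => []
  | t :: rest =>
    if t == "--exclude" || t == "--include" then
      match rest with
      | v :: rest' =>
        ((if t == "--exclude" then "-" else "") ++ v) :: expand_exclude_directive_py rest'
      | [] => []
    else if PySem.Str.startswith t "--exclude=" || PySem.Str.startswith t "--include=" then
      -- k, v = t.split("=", 1): the guard ensures "=" occurs, so split gives two pieces
      match PySem.Str.splitMax? t "=" 1 with
      | some (k :: v :: _) =>
        ((if k == "--exclude" then "-" else "") ++ v) :: expand_exclude_directive_py rest
      | _ => expand_exclude_directive_py rest   -- unreachable totality guard
    else
      t :: expand_exclude_directive_py rest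

-- ===== PORT B =====
-- Source B's for-loop: state = (out accumulator, pending prefix Option).
def expand_exclude_directive_py_alt_loop (out : List String) (pending : Option String) (tokens : List String) : List String :=
  match tokens with
  | [] => out
  | t :: rest =>
    match pending with
    | some p => expand_exclude_directive_py_alt_loop (out ++ [p ++ t]) none rest
    | none =>
      if t == "--exclude" then expand_exclude_directive_py_alt_loop out (some "-") rest
      else if t == "--include" then expand_exclude_directive_py_alt_loop out (some "") rest
      else if PySem.Str.startswith t "--exclude=" then
        expand_exclude_directive_py_alt_loop (out ++ ["-" ++ (((PySem.Str.splitMax? t "=" 1).getD []).getD 1 "")]) none rest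
      else if PySem.Str.startswith t "--include=" then
        expand_exclude_directive_py_alt_loop (out ++ [((PySem.Str.splitMax? t "=" 1).getD []).getD 1 ""]) none rest
      else expand_exclude_directive_py_alt_loop (out ++ [t]) none rest

def expand_exclude_directive_py_alt (tokens : List String) : List String :=
  expand_exclude_directive_py_alt_loop [] none tokens

-- ===== PRECONDITION & SPEC =====
def Spec_expand_exclude_directive_py (tokens : List String) (out : List String) : Prop := out = expand_exclude_directive_py_alt tokens
instance (tokens : List String) (out : List String) : Decidable (Spec_expand_exclude_directive_py tokens out) := by unfold Spec_expand_exclude_directive_py; infer_instance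

-- ===== CLAIM (what is proved, stated in full; the proofs are below) =====
def Claim_equal_expand_exclude_directive_py : Prop := ∀ (tokens : List String), Dom_expand_exclude_directive_py tokens → Spec_expand_exclude_directive_py tokens (expand_exclude_directive_py tokens)

-- ===== LEMMAS AND PROOFS =====

theorem alt_loop_out (out : List String) (pending : Option String) (tokens : List String) :
    expand_exclude_directive_py_alt_loop out pending tokens
      = out ++ expand_exclude_directive_py_alt_loop [] pending tokens := by
  induction tokens generalizing out pending with
  | nil => simp [expand_exclude_directive_py_alt_loop]
  | cons t rest ih =>
    cases pending with
    | some p =>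
      simp only [expand_exclude_directive_py_alt_loop]
      rw [ih (out ++ [p ++ t]), ih ([] ++ [p ++ t])]
      simp
    | none =>
      simp only [expand_exclude_directive_py_alt_loop]
      split_ifs <;> first
        | (rw [ih (out ++ _), ih ([] ++ _)]; simp)
        | rw [ih]

-- once maxsplit is exhausted (m = 0) and cur = [], go returns the remainder as the last piece
theorem go_zero (u : List Char) (acc : List (List Char)) (fuel : Nat) :
    PySem.Chars.splitOnMax.go ['='] fuel 0 u [] acc = (u :: acc).reverse := by
  cases fuel with
  | zero => simp [PySem.Chars.splitOnMax.go]
  | succ f => cases u <;> simp [PySem.Chars.splitOnMax.go]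

-- one split at the first '=': the scan over a '='-free prefix
theorem go_one (pre : List Char) (u : List Char) (cur : List Char) (acc : List (List Char))
    (fuel : Nat) (hpre : '=' ∉ pre) (hfuel : pre.length < fuel) :
    PySem.Chars.splitOnMax.go ['='] fuel 1 (pre ++ '=' :: u) cur acc
      = (u :: (cur.reverse ++ pre) :: acc).reverse := by
  induction pre generalizing fuel cur with
  | nil =>
    cases fuel with
    | zero => omega
    | succ f =>
      simp only [List.nil_append, PySem.Chars.splitOnMax.go, List.isPrefixOf]
      simp [go_zero]
  | cons c pre' ih =>
    cases fuel with
    | zero => omega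
    | succ f =>
      have hc : c ≠ '=' := by simp at hpre; tauto
      simp only [List.cons_append, PySem.Chars.splitOnMax.go, List.isPrefixOf]
      rw [if_neg (by simp), if_neg (by simp; exact fun h2 => hc h2.symm)]
      rw [ih (c :: cur) f (by simp at hpre; tauto) (by simpa using hfuel)]
      simp

theorem splitMax_eq (pre u : List Char) (hpre : '=' ∉ pre) :
    PySem.Chars.splitMax? (pre ++ '=' :: u) ['='] 1 = some [pre, u] := by
  simp only [PySem.Chars.splitMax?, PySem.Chars.splitOnMax]
  rw [if_neg (by simp), if_neg (by norm_num), Int.toNat_one]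
  rw [go_one pre u [] [] _ hpre
    (by simp only [List.length_append, List.length_cons]; omega)]
  simp

-- if t starts with pre ++ "=" with '=' ∉ pre, then t.split("=", 1) = [pre, remainder]
theorem split_of_startswith (t : String) (pre : List Char) (hpre : '=' ∉ pre)
    (h : PySem.Str.startswith t (String.ofList (pre ++ ['='])) = true) :
    PySem.Str.splitMax? t "=" 1
      = some [String.ofList pre, String.ofList (t.toList.drop (pre.length + 1))] := by
  have hp : (pre ++ ['=']) <+: t.toList :=
    (PySem.Chars.startswith_iff t.toList (pre ++ ['='])).mp
      (by simpa [String.toList_ofList] using h)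
  obtain ⟨u, hu⟩ := hp
  have ht : t.toList = pre ++ '=' :: u := by simpa using hu.symm
  have h1 : PySem.Str.splitMax? t "=" 1
      = Option.map (fun x => List.map String.ofList x)
          (PySem.Chars.splitMax? t.toList "=".toList 1) := rfl
  have h2 : "=".toList = ['='] := rfl
  rw [h1, ht, h2, splitMax_eq pre u hpre]
  simp

theorem startswith_excl (t : String) (h : PySem.Str.startswith t "--exclude=" = true) :
    PySem.Str.splitMax? t "=" 1
      = some ["--exclude", String.ofList (t.toList.drop 10)] := by
  have := split_of_startswith t "--exclude".toList (by decide) (by simpa using h)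
  simpa using this

theorem startswith_incl (t : String) (h : PySem.Str.startswith t "--include=" = true) :
    PySem.Str.splitMax? t "=" 1
      = some ["--include", String.ofList (t.toList.drop 10)] := by
  have := split_of_startswith t "--include".toList (by decide) (by simpa using h)
  simpa using this

theorem loop_cons_out (x : String) (pending : Option String) (ts : List String) :
    expand_exclude_directive_py_alt_loop [x] pending ts
      = x :: expand_exclude_directive_py_alt_loop [] pending ts := by
  rw [alt_loop_out]; rfl

theorem main (tokens : List String) :
    expand_exclude_directive_py tokens = expand_exclude_directive_py_alt_loop [] none tokens := by
  induction tokens using expand_exclude_directive_py.induct with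
  | case1 => rfl
  | case2 t hdir v rest' ih =>
    rcases Bool.or_eq_true_iff.mp hdir with he | hi
    · simp only [expand_exclude_directive_py,
        expand_exclude_directive_py_alt_loop, he]
      rw [ih, alt_loop_out ([] ++ ["-" ++ v])]
      simp
    · have hne : (t == "--exclude") = false := by
        have := beq_iff_eq.mp hi; subst this; decide
      simp only [expand_exclude_directive_py,
        expand_exclude_directive_py_alt_loop, hne, hi,
        Bool.false_eq_true, if_false]
      rw [ih, alt_loop_out ([] ++ ["" ++ v])]
      simp
  | case3 t hdir =>
    rcases Bool.or_eq_true_iff.mp hdir with he | hi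
    · have := beq_iff_eq.mp he; subst this; decide
    · have := beq_iff_eq.mp hi; subst this; decide
  | case4 t rest hdir hsw k v tail hsplit ih =>
    have hne : (t == "--exclude") = false := by
      cases h : t == "--exclude" <;> simp_all
    have hni : (t == "--include") = false := by
      cases h : t == "--include" <;> simp_all
    rw [expand_exclude_directive_py.eq_def]
    simp only [hne, hni, Bool.or_self, Bool.false_eq_true, if_false, hsw,
      if_pos, hsplit]
    rw [ih]
    by_cases he : PySem.Str.startswith t "--exclude=" = true
    · have hs := startswith_excl t he
      rw [hsplit] at hs
      injection hs with hs
      have hk : k = "--exclude" := by injection hs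
      have hv : v = String.ofList (t.toList.drop 10) := by
        injection hs with _ hs'; injection hs'
      simp only [expand_exclude_directive_py_alt_loop, hne, hni,
        Bool.false_eq_true, if_false, he, if_pos, hsplit]
      simp [hk, hv, loop_cons_out]
    · have hi : PySem.Str.startswith t "--include=" = true := by
        rcases Bool.or_eq_true_iff.mp hsw with h | h
        · exact absurd h he
        · exact h
      have hs := startswith_incl t hi
      rw [hsplit] at hs
      injection hs with hs
      have hk : k = "--include" := by injection hs
      have hv : v = String.ofList (t.toList.drop 10) := by
        injection hs with _ hs'; injection hs'
      have hke : (k == "--exclude") = false := by subst hk; decide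
      simp only [expand_exclude_directive_py_alt_loop, hne, hni,
        Bool.false_eq_true, if_false, eq_false_of_ne_true he, hi, if_pos,
        hke, hsplit]
      simp [hv, loop_cons_out]
  | case5 t rest hdir hsw hnone ih =>
    exfalso
    rcases Bool.or_eq_true_iff.mp hsw with h | h
    · exact hnone _ _ _ (startswith_excl t h)
    · exact hnone _ _ _ (startswith_incl t h)
  | case6 t rest hdir hsw ih =>
    have hne : (t == "--exclude") = false := by
      cases h : t == "--exclude" <;> simp_all
    have hni : (t == "--include") = false := by
      cases h : t == "--include" <;> simp_all
    have hse : PySem.Str.startswith t "--exclude=" = false := by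
      cases h : PySem.Str.startswith t "--exclude=" <;> simp_all
    have hsi : PySem.Str.startswith t "--include=" = false := by
      cases h : PySem.Str.startswith t "--include=" <;> simp_all
    rw [expand_exclude_directive_py.eq_def]
    simp only [expand_exclude_directive_py_alt_loop, hne, hni, hse, hsi,
      Bool.or_self, Bool.false_eq_true, if_false]
    rw [ih, alt_loop_out ([] ++ [t])]
    simp

-- ===== VERDICT (by name: the statement is the Claim_ definition above) =====
theorem expand_exclude_directive_py_spec : Claim_equal_expand_exclude_directive_py := by
  intro tokens _
  unfold Spec_expand_exclude_directive_py expand_exclude_directive_py_alt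
  exact main tokens
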